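-- pv_equiv track=rewrite | github.com/thegusmao/complianshift | core/upgrade_checker.py | _check_operator_channels
-- ===== SOURCE A (Python) =====
-- def _check_operator_channels(target_data, current_channel):
--     available_channels = []
--     channel_supported = False
--
--     for ch_info in target_data:
--         ch_name_raw = ch_info.get("channel", "")
--
--         display_channel = ch_name_raw.replace(" (default)", "").strip()
--         available_channels.append(display_channel)
--
--         base_channel_json = ch_name_raw.split(" ")[0]
--         if base_channel_json == current_channel:
--             channel_supported = True
--             break
--
--     return channel_supported, available_channels
-- ===== SOURCE B (Python) =====
-- def _check_operator_channels(target_data, current_channel):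
--     idx = next((i for i, ch in enumerate(target_data)
--                 if ch.get("channel", "").split(" ")[0] == current_channel), None)
--     relevant = target_data if idx is None else target_data[:idx + 1]
--     available_channels = [ch.get("channel", "").replace(" (default)", "").strip()
--                           for ch in relevant]
--     return idx is not None, available_channels
-- ===== Notes on version B (the rewrite author's own statement) =====
-- stated objective: alternative
-- what changed: The single interleaved loop with a break is split into two passes: a next()-over-enumerate search locating the first matching channel index, then a list comprehension building the display names over the prefix up to that index (or the whole list).
import Mathlib
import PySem

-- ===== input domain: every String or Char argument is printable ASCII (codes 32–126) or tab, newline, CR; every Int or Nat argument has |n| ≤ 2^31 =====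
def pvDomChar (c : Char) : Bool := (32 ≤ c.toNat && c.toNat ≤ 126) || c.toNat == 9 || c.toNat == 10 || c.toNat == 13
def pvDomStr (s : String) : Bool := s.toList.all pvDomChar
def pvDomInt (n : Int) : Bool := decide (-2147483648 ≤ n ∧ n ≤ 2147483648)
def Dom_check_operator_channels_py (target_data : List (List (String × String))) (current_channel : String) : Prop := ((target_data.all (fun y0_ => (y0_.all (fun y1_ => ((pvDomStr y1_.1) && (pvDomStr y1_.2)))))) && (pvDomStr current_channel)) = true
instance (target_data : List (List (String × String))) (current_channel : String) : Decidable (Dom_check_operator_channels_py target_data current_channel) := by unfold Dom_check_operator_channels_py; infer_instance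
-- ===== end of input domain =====

-- B replaces A's single loop-with-break by a locate-then-construct pair of passes (alternative decomposition, same cost).

-- ===== PORT A =====
-- the for-loop with break, carrying available_channels as accumulator
def pvLoopA (current_channel : String) :
    List (List (String × String)) → List String → Bool × List String
  | [], acc => (false, acc)
  | ch_info :: rest, acc =>
    let ch_name_raw := (PySem.Dict.ofList ch_info).getD "channel" ""
    let display_channel := PySem.Str.strip (PySem.Str.replace ch_name_raw " (default)" "")
    let acc' := acc ++ [display_channel]
    let base_channel_json := PySem.List.pyGetD ((PySem.Str.split? ch_name_raw " ").getD []) 0 ""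
    if base_channel_json == current_channel then (true, acc')
    else pvLoopA current_channel rest acc'

def check_operator_channels_py (target_data : List (List (String × String))) (current_channel : String) : Bool × List String :=
  pvLoopA current_channel target_data []

-- ===== PORT B =====
-- next((i for i, ch in enumerate(target_data) if ch.get("channel","").split(" ")[0] == current_channel), None)
def pvFindIdxB (current_channel : String) :
    List (List (String × String)) → Int → Option Int
  | [], _ => none
  | ch :: rest, i =>
    if PySem.List.pyGetD ((PySem.Str.split? ((PySem.Dict.ofList ch).getD "channel" "") " ").getD []) 0 "" == current_channel
    then some i
    else pvFindIdxB current_channel rest (i + 1)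

def check_operator_channels_py_alt (target_data : List (List (String × String))) (current_channel : String) : Bool × List String :=
  let idx := pvFindIdxB current_channel target_data 0
  let relevant := match idx with
    | none => target_data
    | some i => PySem.List.slice target_data none (some (i + 1))
  (idx.isSome,
   relevant.map (fun ch => PySem.Str.strip (PySem.Str.replace ((PySem.Dict.ofList ch).getD "channel" "") " (default)" "")))

-- ===== PRECONDITION & SPEC =====
def Spec_check_operator_channels_py (target_data : List (List (String × String))) (current_channel : String) (out : Bool × List String) : Prop := out = check_operator_channels_py_alt target_data current_channel
instance (target_data : List (List (String × String))) (current_channel : String) (out : Bool × List String) : Decidable (Spec_check_operator_channels_py target_data current_channel out) := by unfold Spec_check_operator_channels_py; infer_instance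

-- ===== CLAIM (what is proved, stated in full; the proofs are below) =====
def Claim_equal_check_operator_channels_py : Prop := ∀ (target_data : List (List (String × String))) (current_channel : String), Dom_check_operator_channels_py target_data current_channel → Spec_check_operator_channels_py target_data current_channel (check_operator_channels_py target_data current_channel)

-- ===== LEMMAS AND PROOFS =====

def pvDisp (ch : List (String × String)) : String :=
  PySem.Str.strip (PySem.Str.replace ((PySem.Dict.ofList ch).getD "channel" "") " (default)" "")

lemma pvFindIdxB_shift (cc : String) (td : List (List (String × String))) (i : Int) :
    pvFindIdxB cc td i = (pvFindIdxB cc td 0).map (fun j => j + i) := by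
  induction td generalizing i with
  | nil => simp [pvFindIdxB]
  | cons c rest ih =>
    simp only [pvFindIdxB]
    split_ifs with h
    · simp
    · rw [ih (i + 1), ih (0 + 1)]
      cases pvFindIdxB cc rest 0
      · simp
      · simp; ring

lemma pvFindIdxB_nonneg (cc : String) (td : List (List (String × String))) (j : Int)
    (h : pvFindIdxB cc td 0 = some j) : 0 ≤ j := by
  induction td generalizing j with
  | nil => simp [pvFindIdxB] at h
  | cons c rest ih =>
    simp only [pvFindIdxB] at h
    split_ifs at h with hc
    · injection h with h; omega
    · rw [pvFindIdxB_shift] at h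
      cases hr : pvFindIdxB cc rest 0 with
      | none => simp [hr] at h
      | some j' =>
        simp [hr] at h
        have := ih j' hr
        omega

lemma pvLoopA_eq (cc : String) (td : List (List (String × String))) (acc : List String) :
    pvLoopA cc td acc =
      match pvFindIdxB cc td 0 with
      | none => (false, acc ++ td.map pvDisp)
      | some j => (true, acc ++ (td.take (j.toNat + 1)).map pvDisp) := by
  induction td generalizing acc with
  | nil => simp [pvLoopA, pvFindIdxB]
  | cons c rest ih =>
    simp only [pvLoopA, pvFindIdxB]
    split_ifs with h
    · simp [pvDisp]
    · rw [ih, pvFindIdxB_shift cc rest (0 + 1)]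
      cases hr : pvFindIdxB cc rest 0 with
      | none => simp [pvDisp]
      | some j =>
        have hj := pvFindIdxB_nonneg cc rest j hr
        have ht : (j + (0 + 1)).toNat + 1 = (j.toNat + 1) + 1 := by omega
        simp only [Option.map_some]
        simp [pvDisp]
        omega

-- ===== VERDICT (by name: the statement is the Claim_ definition above) =====
theorem check_operator_channels_py_spec : Claim_equal_check_operator_channels_py := by
  intro td cc _
  unfold Spec_check_operator_channels_py check_operator_channels_py check_operator_channels_py_alt
  rw [pvLoopA_eq]
  have hd : ∀ xs : List (List (String × String)),
      List.map (fun ch => PySem.Str.strip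
        (PySem.Str.replace ((PySem.Dict.ofList ch).getD "channel" "") " (default)" "")) xs
        = List.map pvDisp xs := fun _ => rfl
  cases hr : pvFindIdxB cc td 0 with
  | none => simp [hd]
  | some j =>
    have hj := pvFindIdxB_nonneg cc td j hr
    have hcast : j + 1 = ((j.toNat + 1 : Nat) : Int) := by omega
    simp only [hcast, PySem.List.slice_to_natCast, Option.isSome_some]
    rw [hd]
    simp
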